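-- pv_equiv track=rewrite | github.com/kris96tian/bioinfo_tool | app.py | create_fm_index
-- ===== SOURCE A (Python) =====
-- def build_suffix_array(text):
--     n = len(text)
--     suffix_array = [i for i in range(n)]
--     suffix_array.sort(key=lambda i: text[i:])
--     return suffix_array
--
-- def bwt(text):
--     suffix_array = build_suffix_array(text)
--     return ''.join(text[i - 1] for i in suffix_array)
--
-- def create_fm_index(text, pattern):
--     bwt_text = bwt(text)
--     sorted_bwt = sorted(bwt_text)
--     occurrences = {}
--     first_occurrence = {}
--     current_char = None
--     for idx, char in enumerate(sorted_bwt):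
--         if char != current_char:
--             first_occurrence[char] = idx
--             current_char = char
--     unique_chars_in_pattern = set(pattern)
--     for char in unique_chars_in_pattern:
--         fo = first_occurrence.get(char, -1)
--         cnt = bwt_text.count(char)
--         occurrences[char] = {'First Occurrence': fo, 'Count': cnt}
--     return occurrences
-- ===== SOURCE B (Python) =====
-- def create_fm_index(text, pattern):
--     # No suffix array / BWT: the BWT is a permutation of the text, so the sorted
--     # BWT is just the sorted text; first occurrence of ch in it = number of
--     # characters < ch, and the count is the plain character count.
--     result = {}
--     for ch in dict.fromkeys(pattern):
--         cnt = text.count(ch)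
--         fo = sum(1 for x in text if x < ch) if cnt else -1
--         result[ch] = {'First Occurrence': fo, 'Count': cnt}
--     return result
-- ===== Notes on version B (the rewrite author's own statement) =====
-- stated objective: faster
-- what changed: Drops the suffix array / BWT entirely: since the BWT is a permutation of the text, B answers per pattern character with a plain character count and a count-of-smaller-characters for the first-occurrence index, in one pass over the text per distinct pattern character.
import Mathlib
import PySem

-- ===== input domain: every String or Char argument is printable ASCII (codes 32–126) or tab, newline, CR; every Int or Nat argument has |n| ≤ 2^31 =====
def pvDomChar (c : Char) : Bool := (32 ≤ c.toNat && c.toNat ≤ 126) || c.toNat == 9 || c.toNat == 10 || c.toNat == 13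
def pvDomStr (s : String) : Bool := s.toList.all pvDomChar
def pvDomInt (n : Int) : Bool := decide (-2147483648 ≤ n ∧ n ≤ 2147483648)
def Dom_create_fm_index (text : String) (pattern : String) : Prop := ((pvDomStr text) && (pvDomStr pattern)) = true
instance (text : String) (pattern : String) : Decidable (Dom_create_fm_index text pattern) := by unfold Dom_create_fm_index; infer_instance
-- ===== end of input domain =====

-- B drops the suffix array / BWT: the BWT permutes the text, so per pattern char a plain
-- character count and a count-of-smaller-characters give the same table (objective: faster).


-- ===== PORT A =====
-- build_suffix_array: sort [0..n-1] by the suffix text[i:] (Python str '<' = Lean '<' on List Char)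
def pvBuildSuffixArray (cs : List Char) : List Int :=
  PySem.List.sorted (PySem.List.pyRange 0 (cs.length : Int) 1)
    (fun i => PySem.List.slice cs (some i) none) false

-- bwt: ''.join(text[i-1] for i in suffix_array), kept as a List Char; text[i-1] is always
-- in range here (i ∈ [0,n)), so the pyGetD default is never used.
def pvBwt (cs : List Char) : List Char :=
  (pvBuildSuffixArray cs).map (fun i => PySem.List.pyGetD cs (i - 1) ' ')

-- the first_occurrence loop: state = (dict, current_char)
def pvFirstOccStep (st : PySem.Dict Char Int × Option Char) (p : Int × Char) :
    PySem.Dict Char Int × Option Char :=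
  if some p.2 ≠ st.2 then (st.1.insert p.2 p.1, some p.2) else st

def create_fm_index (text : String) (pattern : String) : List (String × List (String × Int)) :=
  let bwt_text := pvBwt text.toList
  let sorted_bwt := PySem.List.sorted bwt_text (fun c => c) false
  let first_occurrence :=
    ((PySem.List.enumerate sorted_bwt 0).foldl pvFirstOccStep (PySem.Dict.empty, none)).1
  -- for char in set(pattern): occurrences[char] = {'First Occurrence': fo, 'Count': cnt}
  -- (str.count of a single character = List.count on the char list)
  ((PySem.Set.ofList pattern.toList).foldl
    (fun (occ : PySem.Dict String (List (String × Int))) c =>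
      occ.insert (String.singleton c)
        [("First Occurrence", first_occurrence.getD c (-1)),
         ("Count", (PySem.List.count bwt_text c : Int))])
    PySem.Dict.empty).items

-- ===== PORT B =====
def create_fm_index_alt (text : String) (pattern : String) : List (String × List (String × Int)) :=
  ((PySem.List.dedup pattern.toList).foldl
    (fun (res : PySem.Dict String (List (String × Int))) c =>
      let cnt : Int := (PySem.List.count text.toList c : Int)
      -- sum(1 for x in text if x < ch) if cnt else -1
      let fo : Int := if cnt ≠ 0
        then (text.toList.map (fun x => if x < c then (1 : Int) else 0)).sum
        else -1
      res.insert (String.singleton c) [("First Occurrence", fo), ("Count", cnt)])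
    PySem.Dict.empty).items

-- ===== PRECONDITION & SPEC =====
def Spec_create_fm_index (text : String) (pattern : String) (out : List (String × List (String × Int))) : Prop := out = create_fm_index_alt text pattern
instance (text : String) (pattern : String) (out : List (String × List (String × Int))) : Decidable (Spec_create_fm_index text pattern out) := by unfold Spec_create_fm_index; infer_instance

-- ===== CLAIM (what is proved, stated in full; the proofs are below) =====
def Claim_equal_create_fm_index : Prop := ∀ (text : String) (pattern : String), Dom_create_fm_index text pattern → Spec_create_fm_index text pattern (create_fm_index text pattern)

-- ===== LEMMAS AND PROOFS =====

theorem pvBwt_perm (cs : List Char) : (pvBwt cs).Perm cs := by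
  unfold pvBwt pvBuildSuffixArray
  refine ((PySem.List.sorted_perm _ _ _).map _).trans ?_
  rcases eq_or_ne cs [] with h | h
  · subst h
    simp
  · have hn : 0 < cs.length := List.length_pos_iff.mpr h
    have hmap : (PySem.List.pyRange 0 (cs.length : Int) 1).map
          (fun i => PySem.List.pyGetD cs (i - 1) ' ')
        = cs.getLast h :: cs.dropLast := by
      rw [PySem.List.pyRange_zero_nat, List.map_map]
      apply List.ext_getElem
      · simp; omega
      · intro i h1 h2
        simp only [List.getElem_map, List.getElem_range, Function.comp_apply]
        match i with
        | 0 =>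
          simpa using PySem.List.pyGetD_neg_one cs ' ' h
        | (j+1) =>
          have hj : j < cs.length - 1 := by simp at h1; omega
          have hcast : ((j+1 : Nat) : Int) - 1 = ((j : Nat) : Int) := by push_cast; ring
          rw [hcast, PySem.List.pyGetD_natCast]
          simp [List.getElem_cons_succ, List.getElem_dropLast, List.getD_eq_getElem?_getD,
            List.getElem?_eq_getElem (by omega : j < cs.length)]
    rw [hmap]
    have h2 := List.perm_append_singleton (cs.getLast h) cs.dropLast
    rw [List.dropLast_append_getLast h] at h2
    exact h2.symm


theorem pvFirstOcc_loop (s : List Char) (k : Int) (d : PySem.Dict Char Int) (cur : Option Char)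
    (hs : s.Pairwise (· ≤ ·))
    (hcur : ∀ c0, cur = some c0 → ∀ x ∈ s, c0 ≤ x) (c : Char) :
    (((PySem.List.enumerate s k).foldl pvFirstOccStep (d, cur)).1).get? c
      = if c ∈ s ∧ cur ≠ some c
        then some (k + (s.countP (fun x => decide (x < c)) : Int))
        else d.get? c := by
  induction s generalizing k d cur with
  | nil => simp [PySem.List.enumerate]
  | cons x t ih =>
    rw [PySem.List.enumerate_cons, List.foldl_cons]
    have hxle : ∀ y ∈ t, x ≤ y := fun y hy => (List.pairwise_cons.mp hs).1 y hy
    by_cases hx : cur = some x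
    · -- char == current_char: state unchanged
      have hstep : pvFirstOccStep (d, cur) (k, x) = (d, cur) := by
        simp [pvFirstOccStep, hx]
      rw [hstep, ih (k+1) d cur hs.tail
        (fun c0 hc0 y hy => hcur c0 hc0 y (List.mem_cons_of_mem _ hy))]
      by_cases hcx : c = x
      · subst hcx; simp [hx]
      · have hmem : c ∈ x :: t ↔ c ∈ t := by
          simp [List.mem_cons, hcx]
        by_cases hct : c ∈ t
        · have hxc : x < c := lt_of_le_of_ne (hxle c hct) (fun e => hcx e.symm)
          have hxc' : ¬ x = c := fun e => hcx e.symm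
          have hcur' : cur ≠ some c := by rw [hx]; simp [hxc']
          simp only [hmem, hct, hcur', ne_eq, not_false_iff, true_and, if_pos trivial,
            List.countP_cons, decide_eq_true_eq, hxc]
          congr 1
          push_cast
          ring
        · simp [hmem, hct]
    · -- new char: insert, current := x
      have hstep : pvFirstOccStep (d, cur) (k, x) = (d.insert x k, some x) := by
        simp only [pvFirstOccStep]
        rw [if_pos (show some x ≠ cur from fun e => hx e.symm)]
      rw [hstep, ih (k+1) (d.insert x k) (some x) hs.tail
        (fun c0 hc0 y hy => by cases Option.some_injective _ hc0; exact hxle y hy)]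
      by_cases hcx : c = x
      · subst hcx
        have hct0 : t.countP (fun y => decide (y < c)) = 0 := by
          apply List.countP_eq_zero.mpr
          intro y hy
          simp [not_lt.mpr (hxle y hy)]
        simp [hx, hct0, PySem.Dict.get?_insert_self]
      · by_cases hct : c ∈ t
        · have hxc : x < c := lt_of_le_of_ne (hxle c hct) (fun e => hcx e.symm)
          have hcur' : cur ≠ some c := by
            intro e
            exact hcx (le_antisymm (hxle c hct) (hcur c e x (List.mem_cons_self))).symm
          have hxc' : ¬ x = c := fun e => hcx e.symm
          have hcx' : (some x : Option Char) ≠ some c := by simp [hxc']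
          simp only [hct, hcx', ne_eq, not_false_iff, true_and, if_pos, List.mem_cons, hcx,
            false_or, hcur', List.countP_cons, decide_eq_true_eq, hxc]
          congr 1
          push_cast
          ring
        · have : c ∉ x :: t := by simp [hcx, hct]
          simp [hct, this, PySem.Dict.get?_insert_of_ne d k hcx]


theorem create_fm_index_spec' : ∀ (text pattern : String),
    create_fm_index text pattern = create_fm_index_alt text pattern := by
  intro text pattern
  simp only [create_fm_index, create_fm_index_alt, PySem.List.dedup_eq_ofList]
  refine congrArg PySem.Dict.items ?_
  apply PySem.List.foldl_congr_mem
  intro occ c _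
  have hperm : (pvBwt text.toList).Perm text.toList := pvBwt_perm text.toList
  -- counts agree
  have hcnt : (PySem.List.count (pvBwt text.toList) c : Int)
      = (PySem.List.count text.toList c : Int) := by
    simp [PySem.List.count_eq, hperm.count_eq]
  -- first-occurrence values agree
  have hsorted := PySem.List.sorted_pairwise (pvBwt text.toList) (fun c => c)
  have hloop := pvFirstOcc_loop (PySem.List.sorted (pvBwt text.toList) (fun c => c) false)
      0 PySem.Dict.empty none hsorted (by intro c0 h; cases h) c
  have hmem : c ∈ PySem.List.sorted (pvBwt text.toList) (fun c => c) false ↔ c ∈ text.toList := by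
    rw [PySem.List.mem_sorted]; exact hperm.mem_iff
  have hcountP : (PySem.List.sorted (pvBwt text.toList) (fun c => c) false).countP
        (fun x => decide (x < c))
      = text.toList.countP (fun x => decide (x < c)) :=
    ((PySem.List.sorted_perm _ _ _).countP_eq _).trans (hperm.countP_eq _)
  have hsum : (text.toList.map (fun x => if x < c then (1 : Int) else 0)).sum
      = (text.toList.countP (fun x => decide (x < c)) : Int) := by
    have he : (fun x => if x < c then (1 : Int) else 0)
        = (fun x => if (fun y => decide (y < c)) x = true then (1 : Int) else 0) := by
      funext x; simp
    rw [he, PySem.List.sum_map_ite_one_zero]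
  have hfo : (((PySem.List.enumerate
        (PySem.List.sorted (pvBwt text.toList) (fun c => c) false) 0).foldl
        pvFirstOccStep (PySem.Dict.empty, none)).1).getD c (-1)
      = if (PySem.List.count text.toList c : Int) ≠ 0
        then (text.toList.map (fun x => if x < c then (1 : Int) else 0)).sum
        else -1 := by
    show ((((PySem.List.enumerate _ 0).foldl pvFirstOccStep (PySem.Dict.empty, none)).1).get? c).getD (-1) = _
    rw [hloop]
    by_cases hc : c ∈ text.toList
    · rw [if_pos ⟨hmem.mpr hc, by simp⟩]
      have hpos : (PySem.List.count text.toList c : Int) ≠ 0 := by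
        simp only [PySem.List.count_eq]
        exact_mod_cast (List.count_pos_iff.mpr hc).ne'
      rw [if_pos hpos, hsum, hcountP]
      simp
    · rw [if_neg (by simp [hmem, hc])]
      have hz : (PySem.List.count text.toList c : Int) = 0 := by
        simp only [PySem.List.count_eq, Int.natCast_eq_zero]
        exact List.count_eq_zero.mpr hc
      rw [if_neg (not_not_intro hz)]
      simp
  rw [hcnt, hfo]

-- ===== VERDICT (by name: the statement is the Claim_ definition above) =====
theorem create_fm_index_spec : Claim_equal_create_fm_index := by
  intro text pattern _
  unfold Spec_create_fm_index
  exact create_fm_index_spec' text pattern
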